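-- pv_equiv track=rewrite | github.com/mongoose1616/WatchTowerPlan | core/python/src/watchtower_core/repo_ops/query/routes.py | _matched_token_count
-- ===== SOURCE A (Python) =====
-- def _matched_token_count(
--     request_tokens: tuple[str, ...],
--     candidate_tokens: tuple[str, ...],
-- ) -> int:
--     return sum(
--         1
--         for candidate in candidate_tokens
--         if any(_tokens_match(request, candidate) for request in request_tokens)
--     )
--
-- def _tokens_match(request_token: str, candidate_token: str) -> bool:
--     if request_token == candidate_token:
--         return True
--     if min(len(request_token), len(candidate_token)) >= 4 and (
--         request_token.startswith(candidate_token) or candidate_token.startswith(request_token)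
--     ):
--         return True
--     common_prefix = len(_common_prefix(request_token, candidate_token))
--     return common_prefix >= 4
--
-- def _common_prefix(left: str, right: str) -> str:
--     prefix: list[str] = []
--     for left_char, right_char in zip(left, right, strict=False):
--         if left_char != right_char:
--             break
--         prefix.append(left_char)
--     return "".join(prefix)
-- ===== SOURCE B (Python) =====
-- def _matched_token_count(request_tokens, candidate_tokens):
--     # Index request tokens once: exact strings plus 4-char prefixes of long tokens.
--     # A pair matches iff equal, or both have length >= 4 and share their first 4 chars.
--     exact = set(request_tokens)
--     prefixes = {t[:4] for t in request_tokens if len(t) >= 4}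
--     count = 0
--     for c in candidate_tokens:
--         if c in exact or (len(c) >= 4 and c[:4] in prefixes):
--             count += 1
--     return count
-- ===== Notes on version B (the rewrite author's own statement) =====
-- stated objective: faster
-- what changed: Replaces the nested scan (every request token matched against every candidate with a char-by-char common-prefix loop) by two hash sets built once over the request tokens (exact strings and 4-char prefixes), so each candidate costs one or two O(1) lookups; correctness rests on the proved fact that _tokens_match(r,c) is exactly r==c or (len(r)>=4 and len(c)>=4 and r[:4]==c[:4]).
import Mathlib
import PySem

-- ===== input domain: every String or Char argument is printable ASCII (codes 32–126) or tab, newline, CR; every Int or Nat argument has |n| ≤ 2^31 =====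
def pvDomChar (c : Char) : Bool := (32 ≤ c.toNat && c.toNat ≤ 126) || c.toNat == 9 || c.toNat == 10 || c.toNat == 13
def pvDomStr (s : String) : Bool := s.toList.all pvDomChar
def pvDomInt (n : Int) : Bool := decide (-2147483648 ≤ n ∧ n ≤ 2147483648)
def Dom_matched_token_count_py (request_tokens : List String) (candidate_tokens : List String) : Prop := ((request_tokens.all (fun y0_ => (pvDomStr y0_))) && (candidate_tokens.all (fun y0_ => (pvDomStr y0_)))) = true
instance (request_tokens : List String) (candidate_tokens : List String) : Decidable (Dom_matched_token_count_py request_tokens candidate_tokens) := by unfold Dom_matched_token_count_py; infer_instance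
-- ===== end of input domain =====

-- B replaces A's nested request×candidate scan by two sets (exact request tokens and their
-- 4-char prefixes) built once, one lookup per candidate; return value only, no side effects.

-- ===== PORT A =====
-- _common_prefix's loop: zip the two char lists, append while equal, break at first mismatch
def cpChars : List Char → List Char → List Char
  | a :: as, b :: bs => if a = b then a :: cpChars as bs else []
  | _, _ => []

def common_prefix_py (left : String) (right : String) : String :=
  String.ofList (cpChars left.toList right.toList)

def tokens_match_py (request_token : String) (candidate_token : String) : Bool :=
  if request_token == candidate_token then true
  else if decide (4 ≤ min (PySem.Str.len request_token) (PySem.Str.len candidate_token)) &&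
          (PySem.Str.startswith request_token candidate_token ||
           PySem.Str.startswith candidate_token request_token) then true
  else decide (4 ≤ PySem.Str.len (common_prefix_py request_token candidate_token))

def matched_token_count_py (request_tokens : List String) (candidate_tokens : List String) : Int :=
  candidate_tokens.foldl
    (fun acc candidate =>
      if request_tokens.any (fun request => tokens_match_py request candidate) then acc + 1 else acc)
    0

-- ===== PORT B =====
def matched_token_count_py_alt (request_tokens : List String) (candidate_tokens : List String) : Int :=
  let exact : PySem.Set String := PySem.Set.ofList request_tokens
  let prefixes : PySem.Set String :=
    PySem.Set.ofList
      ((request_tokens.filter (fun t => decide (4 ≤ PySem.Str.len t))).map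
        (fun t => String.ofList (PySem.List.slice t.toList none (some 4))))
  candidate_tokens.foldl
    (fun count c =>
      if exact.contains c ||
         (decide (4 ≤ PySem.Str.len c) &&
          prefixes.contains (String.ofList (PySem.List.slice c.toList none (some 4)))) then
        count + 1
      else count)
    0

-- ===== PRECONDITION & SPEC =====
def Spec_matched_token_count_py (request_tokens : List String) (candidate_tokens : List String) (out : Int) : Prop := out = matched_token_count_py_alt request_tokens candidate_tokens
instance (request_tokens : List String) (candidate_tokens : List String) (out : Int) : Decidable (Spec_matched_token_count_py request_tokens candidate_tokens out) := by unfold Spec_matched_token_count_py; infer_instance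

-- ===== CLAIM (what is proved, stated in full; the proofs are below) =====
def Claim_equal_matched_token_count_py : Prop := ∀ (request_tokens : List String) (candidate_tokens : List String), Dom_matched_token_count_py request_tokens candidate_tokens → Spec_matched_token_count_py request_tokens candidate_tokens (matched_token_count_py request_tokens candidate_tokens)

-- ===== LEMMAS AND PROOFS =====

-- the common-prefix loop keeps ≥ n chars iff both strings have ≥ n chars and agree on the first n
theorem cpChars_le_iff (a b : List Char) (n : Nat) :
    n ≤ (cpChars a b).length ↔ (n ≤ a.length ∧ n ≤ b.length ∧ a.take n = b.take n) := by
  induction a generalizing b n with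
  | nil =>
    cases n with
    | zero => simp [cpChars]
    | succ m => simp [cpChars]
  | cons x as ih =>
    cases b with
    | nil =>
      cases n with
      | zero => simp [cpChars]
      | succ m => simp [cpChars]
    | cons y bs =>
      by_cases hxy : x = y
      · cases n with
        | zero => simp [cpChars, hxy]
        | succ m =>
          simp only [cpChars, hxy, if_true, List.length_cons, List.take_succ_cons,
            Nat.succ_le_succ_iff, List.cons.injEq, true_and]
          exact ih bs m
      · cases n with
        | zero => simp [cpChars, hxy]
        | succ m =>
          simp only [cpChars, if_neg hxy, List.length_nil, List.take_succ_cons,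
            List.cons.injEq]
          constructor
          · omega
          · rintro ⟨-, -, h, -⟩; exact absurd h hxy

theorem take_of_prefix_le {p s : List Char} (h : p <+: s) (hn : 4 ≤ p.length) :
    s.take 4 = p.take 4 := by
  obtain ⟨t, rfl⟩ := h
  exact List.take_append_of_le_length hn

theorem tokens_match_iff (r c : String) :
    tokens_match_py r c = true ↔
      (r = c ∨ (4 ≤ r.toList.length ∧ 4 ≤ c.toList.length ∧ r.toList.take 4 = c.toList.take 4)) := by
  unfold tokens_match_py
  split_ifs with h1 h2
  · simp only [beq_iff_eq] at h1
    simp [h1]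
  · simp only [beq_iff_eq] at h1
    simp only [Bool.and_eq_true, Bool.or_eq_true, decide_eq_true_eq,
      PySem.Str.len_eq, PySem.Str.startswith_eq, PySem.Chars.startswith_iff] at h2
    obtain ⟨hmin, hsw⟩ := h2
    have hr : 4 ≤ r.toList.length := by omega
    have hc : 4 ≤ c.toList.length := by omega
    constructor
    · intro _
      right
      refine ⟨hr, hc, ?_⟩
      rcases hsw with h | h
      · exact (take_of_prefix_le h hc)
      · exact (take_of_prefix_le h hr).symm
    · intro _; rfl
  · simp only [beq_iff_eq] at h1
    rw [decide_eq_true_eq, PySem.Str.len_eq]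
    have : (common_prefix_py r c).toList = cpChars r.toList c.toList := by
      simp [common_prefix_py]
    rw [this]
    have h4 : ((4 : Int) ≤ (cpChars r.toList c.toList).length) ↔
        4 ≤ (cpChars r.toList c.toList).length := by exact_mod_cast Iff.rfl
    rw [h4, cpChars_le_iff]
    constructor
    · intro h; exact Or.inr h
    · rintro (h | h)
      · exact absurd h h1
      · exact h

-- per-candidate: A's inner `any` equals B's set lookups
theorem any_eq_lookup (rs : List String) (c : String) :
    rs.any (fun r => tokens_match_py r c) =
      ((PySem.Set.ofList rs).contains c ||
       (decide (4 ≤ PySem.Str.len c) &&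
        (PySem.Set.ofList
          ((rs.filter (fun t => decide (4 ≤ PySem.Str.len t))).map
            (fun t => String.ofList (PySem.List.slice t.toList none (some 4))))).contains
          (String.ofList (PySem.List.slice c.toList none (some 4))))) := by
  rw [Bool.eq_iff_iff]
  have hslice : ∀ s : List Char, PySem.List.slice s none (some (4:Int)) = s.take 4 := by
    intro s
    rw [PySem.List.slice_to s (by norm_num)]
    rfl
  simp only [List.any_eq_true, tokens_match_iff, Bool.or_eq_true, Bool.and_eq_true,
    PySem.Set.contains_iff, PySem.Set.mem_ofList, List.mem_map, List.mem_filter,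
    decide_eq_true_eq, PySem.Str.len_eq, hslice]
  constructor
  · rintro ⟨r, hr, hmatch⟩
    rcases hmatch with rfl | ⟨h1, h2, h3⟩
    · exact Or.inl hr
    · refine Or.inr ⟨by exact_mod_cast h2, ⟨r, ⟨hr, by exact_mod_cast h1⟩, ?_⟩⟩
      rw [h3]
  · rintro (hc | ⟨hlen, r, ⟨hr, hrlen⟩, heq⟩)
    · exact ⟨c, hc, Or.inl rfl⟩
    · refine ⟨r, hr, Or.inr ⟨by exact_mod_cast hrlen, by exact_mod_cast hlen, ?_⟩⟩
      have := congrArg String.toList heq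
      simpa using this

-- ===== VERDICT (by name: the statement is the Claim_ definition above) =====
theorem matched_token_count_py_spec : Claim_equal_matched_token_count_py := by
  intro rs cs _
  unfold Spec_matched_token_count_py matched_token_count_py matched_token_count_py_alt
  congr 1
  funext acc c
  rw [any_eq_lookup]
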